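/- GENERATED by mk_final_copies.py from the proof of the farm's unit `vorbis_decode_packet_rest.1b` (farm:vorbis_decode_packet_rest.1b.1: Proof.lean) as the
   re-elaboration sweep compiled it — do not edit. -/
import Vorbis.Spec.Units.vorbis_decode_packet_rest_1b
import Vorbis.Spec.Worked.vorbis_decode_packet_rest_1b_Lemmas

open X86 X86.User Asan Vorbis Vorbis.Spec Vorbis.Spec.vorbis_decode_packet_rest

/-- Unit `vorbis_decode_packet_rest.1b`: from the assertion `At1b` at 0x110bda (after the poison stores of the prologue) the code
0x110bda–0x110c3f (`n = f->blocksize[m->blockflag]`, `map = &f->mapping[m->mapping]`, `n2 = n >> 1`, `i = 0`, the spill of `SB`) reaches the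
head of the channel loop 0x1112d4 with `At2 … 0`. The walk, the four check sites and the exit assertion are `seg1b_walk` of Lemmas.lean. -/
theorem Vorbis.Spec.Worked.vorbis_decode_packet_rest_1b_ok : Vorbis.Spec.vorbis_decode_packet_rest_1b.Statement := by
  intro Lay hLay μ hμ u₀ hcode hld1 hld4 hld8
  intro others frames len Ar stored room mode ysz u ret v hat
  exact Vorbis.Spec.vorbis_decode_packet_rest_1b.seg1b_walk Lay hLay μ hμ u₀ hcode hld1 hld4 hld8 others frames len Ar stored room mode
    ysz u ret v hat
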